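-- pv_equiv track=rewrite | github.com/Fundiman/JadeLang | jpkg/config.py | version_satisfies
-- ===== SOURCE A (Python) =====
-- def parse_version(v: str) -> tuple:
--     """parse '1.2.3' or '0.1.0-alpha' into comparable tuple"""
--     v = v.lstrip("^~=v")
--     # split off pre-release tag
--     pre = ""
--     if "-" in v:
--         v, pre = v.split("-", 1)
--     parts = [int(x) for x in v.split(".")]
--     while len(parts) < 3:
--         parts.append(0)
--     return tuple(parts), pre
--
-- def version_satisfies(available: str, constraint: str) -> bool:
--     """check if 'available' satisfies 'constraint'
--     supports: ^1.2.3 (compatible), ~1.2.3 (patch), =1.2.3 (exact), 1.2.3 (exact)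
--     """
--     if constraint == "*" or constraint == "latest":
--         return True
--
--     op = ""
--     ver = constraint
--     for prefix in ("^", "~", ">=", "<=", "!=", "=", ">", "<"):
--         if constraint.startswith(prefix):
--             op = prefix
--             ver = constraint[len(prefix):]
--             break
--
--     avail, _ = parse_version(available)
--     req,   _ = parse_version(ver)
--
--     if op == "^":
--         # compatible — same major, avail >= req
--         return avail[0] == req[0] and avail >= req
--     elif op == "~":
--         # patch-compatible — same major.minor, avail >= req
--         return avail[0] == req[0] and avail[1] == req[1] and avail >= req
--     elif op == ">=":
--         return avail >= req
--     elif op == "<=":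
--         return avail <= req
--     elif op == ">":
--         return avail > req
--     elif op == "<":
--         return avail < req
--     elif op == "!=":
--         return avail != req
--     else:
--         return avail == req
-- ===== SOURCE B (Python) =====
-- def _core(v: str) -> tuple:
--     # strip leading "^~=v" chars, cut the pre-release tag, pad to 3 in closed form
--     i = 0
--     while i < len(v) and v[i] in "^~=v":
--         i += 1
--     v = v[i:]
--     dash = v.find("-")
--     if dash != -1:
--         v = v[:dash]
--     parts = [int(x) for x in v.split(".")]
--     return tuple(parts + [0] * (3 - len(parts)))
--
-- def _intervals(op: str, r: tuple) -> list:
--     # compile the constraint into half-open intervals [lo, hi) over the version order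
--     # (None = unbounded); succ = r+(0,) is the immediate successor of r among
--     # nonnegative version tuples, so  a <= r  <=>  a < succ  and  a > r  <=>  a >= succ.
--     succ = r + (0,)
--     if op == "^":
--         return [(r, (r[0] + 1, 0, 0))]
--     if op == "~":
--         return [(r, (r[0], r[1] + 1, 0))]
--     if op == ">=":
--         return [(r, None)]
--     if op == "<=":
--         return [(None, succ)]
--     if op == ">":
--         return [(succ, None)]
--     if op == "<":
--         return [(None, r)]
--     if op == "!=":
--         return [(None, r), (succ, None)]
--     return [(r, succ)]
--
-- def version_satisfies(available: str, constraint: str) -> bool: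
--     if constraint == "*" or constraint == "latest":
--         return True
--     # pick the operator token by length: two-char tokens, then one-char tokens
--     if constraint[:2] in (">=", "<=", "!="):
--         op, ver = constraint[:2], constraint[2:]
--     elif constraint[:1] in ("^", "~", "=", ">", "<"):
--         op, ver = constraint[:1], constraint[1:]
--     else:
--         op, ver = "", constraint
--     a = _core(available)
--     intervals = _intervals(op, _core(ver))
--     return any((lo is None or lo <= a) and (hi is None or a < hi)
--                for lo, hi in intervals)
-- ===== Notes on version B (the rewrite author's own statement) =====
-- stated objective: alternative
-- what changed: B compiles the constraint into a list of half-open intervals [lo,hi) over the version order (using r+(0,) as the successor of r, so <=,>,!= and = also become interval bounds) and decides satisfaction by a single uniform any()-membership test, and its parser pads with closed-form list arithmetic and find()/slicing instead of A's while-append loop and split.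
import Mathlib
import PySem

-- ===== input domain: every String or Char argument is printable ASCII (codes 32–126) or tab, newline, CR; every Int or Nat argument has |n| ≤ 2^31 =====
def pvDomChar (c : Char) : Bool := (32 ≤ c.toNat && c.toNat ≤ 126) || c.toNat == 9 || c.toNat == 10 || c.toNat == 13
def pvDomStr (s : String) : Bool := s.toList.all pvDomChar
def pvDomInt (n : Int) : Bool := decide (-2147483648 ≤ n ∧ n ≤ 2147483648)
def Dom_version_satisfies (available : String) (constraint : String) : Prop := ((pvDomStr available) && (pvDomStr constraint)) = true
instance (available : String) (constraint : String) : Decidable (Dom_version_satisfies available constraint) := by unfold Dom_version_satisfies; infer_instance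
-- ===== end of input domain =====

-- B compiles the constraint into half-open intervals [lo,hi) over the version order and tests
-- membership uniformly, instead of A's eight-way comparison branch chain (objective: alternative).

-- ===== PORT A =====
-- v.lstrip("^~=v") drops leading chars of that set (exact)
def vsStripLead (cs : List Char) : List Char :=
  cs.dropWhile (fun c => c == '^' || c == '~' || c == '=' || c == 'v')

-- while len(parts) < 3: parts.append(0)
def vsPad (parts : List Int) : List Int :=
  if parts.length < 3 then vsPad (parts ++ [0]) else parts
  termination_by 3 - parts.length
  decreasing_by simp_all; omega

-- parse_version; returns none where Python's int(x) raises ValueError.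
-- v.split("-", 1) with "-" present is (before first '-', after first '-') — exact.
def parseVersion? (v : List Char) : Option (List Int × List Char) :=
  let s := vsStripLead v
  let vp := if PySem.Chars.isIn ['-'] s then (s.takeWhile (· != '-'), (s.dropWhile (· != '-')).tail)
            else (s, ([] : List Char))
  match (PySem.Chars.splitOn vp.1 ['.']).mapM PySem.Int.ofChars? with
  | some parts => some (vsPad parts, vp.2)
  | none => none

-- the 'for prefix in (…): if constraint.startswith(prefix): …; break' loop;
-- constraint[len(prefix):] with a nonnegative index is List.drop (exact)
def vsFindOp : List (List Char) → List Char → List Char × List Char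
  | [], cs => ([], cs)
  | p :: ps, cs => if PySem.Chars.startswith cs p then (p, cs.drop p.length) else vsFindOp ps cs

-- Python's comparison of int tuples is the lexicographic order = Lean's List Int order
-- (a strict prefix compares smaller), so >=,<=,>,<,!=,== port to ≤,<,≠,= on List Int.
def version_satisfies (available : String) (constraint : String) : Bool :=
  if constraint = "*" || constraint = "latest" then true
  else
    let ov := vsFindOp [['^'], ['~'], ['>','='], ['<','='], ['!','='], ['='], ['>'], ['<']] constraint.toList
    match parseVersion? available.toList, parseVersion? ov.2 with
    | some ap, some rp =>
      let avail := ap.1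
      let req := rp.1
      if ov.1 = ['^'] then
        decide (PySem.List.pyGetD avail 0 0 = PySem.List.pyGetD req 0 0) && decide (req ≤ avail)
      else if ov.1 = ['~'] then
        decide (PySem.List.pyGetD avail 0 0 = PySem.List.pyGetD req 0 0) &&
          (decide (PySem.List.pyGetD avail 1 0 = PySem.List.pyGetD req 1 0) && decide (req ≤ avail))
      else if ov.1 = ['>','='] then decide (req ≤ avail)
      else if ov.1 = ['<','='] then decide (avail ≤ req)
      else if ov.1 = ['>'] then decide (req < avail)
      else if ov.1 = ['<'] then decide (avail < req)
      else if ov.1 = ['!','='] then decide (avail ≠ req)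
      else decide (avail = req)
    | _, _ => false   -- Python raises ValueError (int()) here; excluded by Pre_

-- ===== PORT B =====
-- B's _core: the 'while i < len(v) and v[i] in "^~=v": i += 1; v = v[i:]' index loop
def altStrip : List Char → List Char
  | [] => []
  | c :: t => if c = '^' ∨ c = '~' ∨ c = '=' ∨ c = 'v' then altStrip t else c :: t

-- v.find("-") then v[:dash]; parts + [0]*(3-len(parts)) is closed-form padding
-- (Python's [0]*k is empty for k ≤ 0, matching Nat subtraction). none = int() ValueError.
def altCore (v : List Char) : Option (List Int) :=
  let s := altStrip v
  let s := match s.findIdx? (· = '-') with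
           | some dash => s.take dash
           | none => s
  match (PySem.Chars.splitOn s ['.']).mapM PySem.Int.ofChars? with
  | some parts => some (parts ++ List.replicate (3 - parts.length) 0)
  | none => none

-- B's operator pick by token length: the two-char tokens, then the one-char ones
-- (constraint[:2] / [:1] are List.take; the tuple membership tests are the literal disjunctions)
def altOp (cs : List Char) : List Char × List Char :=
  if cs.take 2 = ['>','='] ∨ cs.take 2 = ['<','='] ∨ cs.take 2 = ['!','='] then (cs.take 2, cs.drop 2)
  else if cs.take 1 = ['^'] ∨ cs.take 1 = ['~'] ∨ cs.take 1 = ['='] ∨ cs.take 1 = ['>'] ∨ cs.take 1 = ['<']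
    then (cs.take 1, cs.drop 1)
  else ([], cs)

-- _intervals: half-open intervals [lo, hi), none = unbounded; succ = r + (0,)
def altIntervals (op : List Char) (r : List Int) : List (Option (List Int) × Option (List Int)) :=
  let succ := r ++ [0]
  if op = ['^'] then [(some r, some [PySem.List.pyGetD r 0 0 + 1, 0, 0])]
  else if op = ['~'] then [(some r, some [PySem.List.pyGetD r 0 0, PySem.List.pyGetD r 1 0 + 1, 0])]
  else if op = ['>','='] then [(some r, none)]
  else if op = ['<','='] then [(none, some succ)]
  else if op = ['>'] then [(some succ, none)]
  else if op = ['<'] then [(none, some r)]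
  else if op = ['!','='] then [(none, some r), (some succ, none)]
  else [(some r, some succ)]

def version_satisfies_alt (available : String) (constraint : String) : Bool :=
  if constraint = "*" || constraint = "latest" then true
  else
    let ov := altOp constraint.toList
    match altCore available.toList with
    | none => false   -- same int() ValueError inputs as A; excluded by Pre_
    | some a =>
      match altCore ov.2 with
      | none => false
      | some r =>
        (altIntervals ov.1 r).any (fun iv =>
          (match iv.1 with | none => true | some lo => decide (lo ≤ a)) &&
          (match iv.2 with | none => true | some hi => decide (a < hi)))

-- ===== PRECONDITION & SPEC =====
-- the dot-separated pieces Python feeds to int(): after stripping "^~=v" and the pre-release tag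
def vsIntCore (v : List Char) : List Char :=
  (v.dropWhile (fun c => c == '^' || c == '~' || c == '=' || c == 'v')).takeWhile (· != '-')

-- the constraint minus its comparison operator
def vsVerOf (cs : List Char) : List Char :=
  if cs.take 2 = ['>','='] ∨ cs.take 2 = ['<','='] ∨ cs.take 2 = ['!','='] then cs.drop 2
  else if cs.take 1 = ['^'] ∨ cs.take 1 = ['~'] ∨ cs.take 1 = ['='] ∨ cs.take 1 = ['>'] ∨ cs.take 1 = ['<']
    then cs.drop 1
  else cs

-- Pre_ excludes exactly the inputs where Python's int() raises ValueError on a version component.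
def Pre_version_satisfies (available : String) (constraint : String) : Prop :=
  constraint = "*" ∨ constraint = "latest" ∨
    (((PySem.Chars.splitOn (vsIntCore available.toList) ['.']).all
        (fun p => (PySem.Int.ofChars? p).isSome)) = true ∧
     ((PySem.Chars.splitOn (vsIntCore (vsVerOf constraint.toList)) ['.']).all
        (fun p => (PySem.Int.ofChars? p).isSome)) = true)
instance (available : String) (constraint : String) : Decidable (Pre_version_satisfies available constraint) := by
  unfold Pre_version_satisfies; infer_instance

def pvWitness_version_satisfies : String × String := ("1.2.3", "^1.2")

def Spec_version_satisfies (available : String) (constraint : String) (out : Bool) : Prop :=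
  out = version_satisfies_alt available constraint
instance (available : String) (constraint : String) (out : Bool) : Decidable (Spec_version_satisfies available constraint out) := by
  unfold Spec_version_satisfies; infer_instance

-- ===== CLAIM (what is proved, stated in full; the proofs are below) =====
def Claim_equal_version_satisfies : Prop := ∀ (available : String) (constraint : String), Dom_version_satisfies available constraint → Pre_version_satisfies available constraint → Spec_version_satisfies available constraint (version_satisfies available constraint)

-- ===== LEMMAS AND PROOFS =====

-- B's index-loop strip is A's dropWhile strip
lemma altStrip_eq (cs : List Char) : altStrip cs = vsStripLead cs := by
  induction cs with
  | nil => rfl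
  | cons c t ih =>
    unfold altStrip vsStripLead
    by_cases h : c = '^' ∨ c = '~' ∨ c = '=' ∨ c = 'v'
    · rw [if_pos h]
      rw [List.dropWhile_cons_of_pos (by rcases h with h|h|h|h <;> simp [h])]
      exact ih
    · push_neg at h
      rw [if_neg (by tauto)]
      rw [List.dropWhile_cons_of_neg (by simp [h.1, h.2.1, h.2.2.1, h.2.2.2])]

-- B's find()/slice cut of the pre-release tag equals takeWhile
lemma altCut_eq (s : List Char) :
    (match s.findIdx? (· = '-') with
     | some dash => s.take dash
     | none => s) = s.takeWhile (· != '-') := by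
  induction s with
  | nil => rfl
  | cons c t ih =>
    by_cases h : c = '-'
    · subst h
      simp [List.findIdx?_cons, List.takeWhile_cons]
    · rw [List.findIdx?_cons]
      simp only [decide_eq_true_eq, h, if_false]
      rw [List.takeWhile_cons_of_pos (by simp [h])]
      cases hf : t.findIdx? (· = '-') with
      | none => simp [hf] at ih ⊢; exact ih
      | some d => simp [hf] at ih ⊢; exact ih

-- B's closed-form padding is A's while-append loop
lemma vsPad_eq_replicate (parts : List Int) :
    vsPad parts = parts ++ List.replicate (3 - parts.length) 0 := by
  fun_induction vsPad with
  | case1 parts h ih =>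
    rw [ih, List.append_assoc]
    congr 1
    have h3 : 3 - parts.length = (3 - (parts.length + 1)) + 1 := by omega
    simp only [List.length_append, List.length_cons, List.length_nil, Nat.zero_add]
    rw [h3, List.replicate_succ]
    rfl
  | case2 parts h =>
    have : 3 - parts.length = 0 := by omega
    simp [this]

-- the string fed to int() is vsIntCore, whether or not a pre-release tag is present
lemma parse_core_eq (v : List Char) :
    (if PySem.Chars.isIn ['-'] (vsStripLead v) then ((vsStripLead v).takeWhile (· != '-'), ((vsStripLead v).dropWhile (· != '-')).tail)
     else (vsStripLead v, ([] : List Char))).1 = vsIntCore v := by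
  split_ifs with h
  · rfl
  · show vsStripLead v = vsIntCore v
    unfold vsIntCore vsStripLead
    rw [List.takeWhile_eq_self_iff.mpr]
    intro a ha
    simp only [bne_iff_ne, ne_eq]
    intro he
    subst he
    have hin : PySem.Chars.isIn ['-'] (vsStripLead v) = true := by
      rw [PySem.Chars.isIn_iff_infix]
      exact (List.singleton_infix_iff '-' _).mpr ha
    simp [hin] at h

-- B's _core computes exactly the tuple component of A's parse_version
lemma altCore_eq (v : List Char) : altCore v = (parseVersion? v).map Prod.fst := by
  unfold altCore parseVersion?
  simp only [altStrip_eq, altCut_eq, parse_core_eq v]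
  have hcore : (vsStripLead v).takeWhile (· != '-') = vsIntCore v := by
    unfold vsIntCore vsStripLead; rfl
  rw [hcore]
  cases h : (PySem.Chars.splitOn (vsIntCore v) ['.']).mapM PySem.Int.ofChars? with
  | none => simp
  | some parts => simp [vsPad_eq_replicate]

-- A's ordered prefix scan picks the same operator split as B's by-length test
lemma vsFindOp_eq_altOp (cs : List Char) :
    vsFindOp [['^'], ['~'], ['>','='], ['<','='], ['!','='], ['='], ['>'], ['<']] cs = altOp cs := by
  match cs with
  | [] => simp [vsFindOp, altOp, PySem.Chars.startswith, List.isPrefixOf]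
  | [c] =>
    by_cases h1 : c = '^'
    · subst h1; simp [vsFindOp, altOp, PySem.Chars.startswith, List.isPrefixOf]
    by_cases h2 : c = '~'
    · subst h2; simp [vsFindOp, altOp, PySem.Chars.startswith, List.isPrefixOf]
    by_cases h3 : c = '>'
    · subst h3; simp [vsFindOp, altOp, PySem.Chars.startswith, List.isPrefixOf]
    by_cases h4 : c = '<'
    · subst h4; simp [vsFindOp, altOp, PySem.Chars.startswith, List.isPrefixOf]
    by_cases h5 : c = '='
    · subst h5; simp [vsFindOp, altOp, PySem.Chars.startswith, List.isPrefixOf]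
    simp [vsFindOp, altOp, PySem.Chars.startswith, List.isPrefixOf,
      h1, h2, h3, h4, h5, Ne.symm h1, Ne.symm h2, Ne.symm h3, Ne.symm h4, Ne.symm h5]
  | c :: d :: t =>
    by_cases h1 : c = '^'
    · subst h1; simp [vsFindOp, altOp, PySem.Chars.startswith, List.isPrefixOf]
    by_cases h2 : c = '~'
    · subst h2; simp [vsFindOp, altOp, PySem.Chars.startswith, List.isPrefixOf]
    by_cases h3 : c = '>'
    · subst h3
      by_cases h7 : d = '='
      · subst h7; simp [vsFindOp, altOp, PySem.Chars.startswith, List.isPrefixOf]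
      · simp [vsFindOp, altOp, PySem.Chars.startswith, List.isPrefixOf, h7, Ne.symm h7]
    by_cases h4 : c = '<'
    · subst h4
      by_cases h7 : d = '='
      · subst h7; simp [vsFindOp, altOp, PySem.Chars.startswith, List.isPrefixOf]
      · simp [vsFindOp, altOp, PySem.Chars.startswith, List.isPrefixOf, h7, Ne.symm h7]
    by_cases h6 : c = '!'
    · subst h6
      by_cases h7 : d = '='
      · subst h7; simp [vsFindOp, altOp, PySem.Chars.startswith, List.isPrefixOf]
      · simp [vsFindOp, altOp, PySem.Chars.startswith, List.isPrefixOf, h7, Ne.symm h7]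
    by_cases h5 : c = '='
    · subst h5; simp [vsFindOp, altOp, PySem.Chars.startswith, List.isPrefixOf]
    simp [vsFindOp, altOp, PySem.Chars.startswith, List.isPrefixOf,
      h1, h2, h3, h4, h5, h6, Ne.symm h1, Ne.symm h2, Ne.symm h3, Ne.symm h4, Ne.symm h5, Ne.symm h6]

-- the operator token returned by altOp, and its ver part
lemma altOp_cases (cs : List Char) :
    (altOp cs).2 = vsVerOf cs ∧
    ((altOp cs).1 = [] ∨ (altOp cs).1 = ['^'] ∨ (altOp cs).1 = ['~'] ∨ (altOp cs).1 = ['>','='] ∨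
     (altOp cs).1 = ['<','='] ∨ (altOp cs).1 = ['!','='] ∨ (altOp cs).1 = ['='] ∨
     (altOp cs).1 = ['>'] ∨ (altOp cs).1 = ['<']) := by
  unfold altOp vsVerOf
  split_ifs <;> simp_all <;> tauto

-- every character of every splitOn piece comes from the split list
lemma splitOn_go_mem (sep : List Char) (fuel : Nat) (l cur : List Char) (acc : List (List Char))
    (p : List Char) (hp : p ∈ PySem.Chars.splitOn.go sep fuel l cur acc)
    (c : Char) (hc : c ∈ p) : c ∈ l ∨ c ∈ cur ∨ ∃ q ∈ acc, c ∈ q := by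
  induction fuel generalizing l cur acc with
  | zero =>
    unfold PySem.Chars.splitOn.go at hp
    simp at hp
    rcases hp with h | h
    all_goals first
      | (right; right; exact ⟨p, h, hc⟩)
      | (subst h; simp at hc; tauto)
  | succ n ih =>
    unfold PySem.Chars.splitOn.go at hp
    match l with
    | [] =>
      simp at hp
      rcases hp with h | h
      all_goals first
        | (right; right; exact ⟨p, h, hc⟩)
        | (subst h; simp at hc; tauto)
    | x :: rest =>
      simp at hp
      split at hp
      · have := ih _ _ _ hp
        rcases this with h | h | ⟨q, hq, hcq⟩
        · left; exact List.mem_of_mem_drop h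
        · simp at h
        · simp at hq
          rcases hq with h | h
          · subst h; simp at hcq; tauto
          · right; right; exact ⟨q, h, hcq⟩
      · have := ih _ _ _ hp
        rcases this with h | h | ⟨q, hq, hcq⟩
        · left; simp [h]
        · simp at h
          rcases h with h | h
          · left; simp [h]
          · tauto
        · right; right; exact ⟨q, hq, hcq⟩

lemma splitOn_mem (s sep : List Char) (p : List Char) (hp : p ∈ PySem.Chars.splitOn s sep)
    (c : Char) (hc : c ∈ p) : c ∈ s := by
  unfold PySem.Chars.splitOn at hp
  have := splitOn_go_mem sep (s.length + 1) s [] [] p hp c hc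
  simpa using this

-- int(x) with no '-' in x is nonnegative
lemma ofChars?_nonneg (cs : List Char) (h : '-' ∉ cs) (n : Int)
    (he : PySem.Int.ofChars? cs = some n) : 0 ≤ n := by
  unfold PySem.Int.ofChars? at he
  simp only [] at he
  split at he
  · rename_i ds heq
    exfalso
    apply h
    have hm : '-' ∈ (List.dropWhile PySem.Int.isIntSpace (List.dropWhile PySem.Int.isIntSpace cs).reverse).reverse := by
      rw [heq]; simp
    have h1 := (List.dropWhile_sublist (p := PySem.Int.isIntSpace)
      (l := (List.dropWhile PySem.Int.isIntSpace cs).reverse)).mem (List.mem_reverse.mp hm)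
    exact (List.dropWhile_sublist (p := PySem.Int.isIntSpace) (l := cs)).mem (List.mem_reverse.mp h1)
  · rename_i ds heq
    simp only [bind, Option.bind] at he
    split at he
    · simp at he
    · simp at he; omega
  · rename_i heq h1 h2
    simp only [bind, Option.bind] at he
    split at he
    · simp at he
    · simp at he; omega

lemma vsPad_length (parts : List Int) : 3 ≤ (vsPad parts).length := by
  fun_induction vsPad with
  | case1 parts h ih => exact ih
  | case2 parts h => omega

lemma vsPad_mem (parts : List Int) (x : Int) (hx : x ∈ vsPad parts) : x ∈ parts ∨ x = 0 := by
  fun_induction vsPad with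
  | case1 parts h ih =>
    rcases ih hx with h' | h'
    · simp at h'; tauto
    · tauto
  | case2 parts h => tauto

lemma mapM_isSome (xs : List (List Char)) (h : ∀ x ∈ xs, (PySem.Int.ofChars? x).isSome) :
    ∃ ys, xs.mapM PySem.Int.ofChars? = some ys ∧ ∀ y ∈ ys, ∃ x ∈ xs, PySem.Int.ofChars? x = some y := by
  induction xs with
  | nil => exact ⟨[], by simp, by simp⟩
  | cons x t ih =>
    obtain ⟨ys, hys, hmem⟩ := ih (fun a ha => h a (by simp [ha]))
    obtain ⟨v, hv⟩ := Option.isSome_iff_exists.mp (h x (by simp))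
    refine ⟨v :: ys, ?_, ?_⟩
    · simp [List.mapM_cons, hv, hys]
    · intro y hy
      rcases List.mem_cons.mp hy with h' | h'
      · exact ⟨x, by simp, h' ▸ hv⟩
      · obtain ⟨a, ha, ha2⟩ := hmem y h'
        exact ⟨a, by simp [ha], ha2⟩

lemma core_no_dash (v : List Char) : '-' ∉ vsIntCore v := by
  unfold vsIntCore
  intro hm
  have := List.mem_takeWhile_imp hm
  simp at this

lemma parse_spec (v : List Char)
    (h : ((PySem.Chars.splitOn (vsIntCore v) ['.']).all (fun p => (PySem.Int.ofChars? p).isSome)) = true) :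
    ∃ parts pre, parseVersion? v = some (parts, pre) ∧ 3 ≤ parts.length ∧ ∀ x ∈ parts, 0 ≤ x := by
  unfold parseVersion?
  simp only [parse_core_eq v]
  rw [List.all_eq_true] at h
  obtain ⟨ys, hys, hmem⟩ := mapM_isSome _ (fun x hx => by simpa using h x hx)
  rw [hys]
  refine ⟨vsPad ys, _, rfl, vsPad_length ys, ?_⟩
  intro x hx
  rcases vsPad_mem ys x hx with h' | h'
  · obtain ⟨p, hp, hpe⟩ := hmem x h'
    exact ofChars?_nonneg p (fun hc => core_no_dash v (splitOn_mem _ _ p hp '-' hc)) x hpe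
  · omega

-- lexicographic order facts (Python's tuple order on ints = List Int's order)
lemma list_le_iff (a r : List Int) : r ≤ a ↔ ¬ a < r := Iff.symm Std.not_lt

lemma cons_le_cons_iff' (a0 r0 : Int) (as rs : List Int) :
    (a0 :: as : List Int) ≤ r0 :: rs ↔ a0 < r0 ∨ (a0 = r0 ∧ as ≤ rs) := by
  rw [list_le_iff]
  simp only [List.cons_lt_cons_iff]
  rcases lt_trichotomy a0 r0 with h | h | h
  · constructor
    · intro _; exact Or.inl h
    · intro _; push_neg; constructor
      · omega
      · intro he; omega
  · subst h
    rw [list_le_iff]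
    constructor
    · intro hc; right; exact ⟨rfl, by tauto⟩
    · rintro (h | ⟨_, h⟩)
      · omega
      · rintro (h' | ⟨_, h'⟩) <;> [omega; exact h h']
  · constructor
    · intro hc; exfalso; exact hc (Or.inl h)
    · rintro (h' | ⟨h', _⟩) <;> omega

-- r ++ [0] is the successor of r among componentwise-nonnegative lists
lemma lt_succ_iff (a r : List Int) (ha : ∀ x ∈ a, 0 ≤ x) : a < r ++ [0] ↔ a ≤ r := by
  induction r generalizing a with
  | nil =>
    match a with
    | [] => simp [List.nil_lt_cons]
    | x :: t =>
      have hx : (0:Int) ≤ x := ha x (by simp)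
      simp only [List.nil_append, List.cons_lt_cons_iff]
      constructor
      · rintro (h | ⟨_, h⟩)
        · omega
        · exact absurd h (List.not_lt_nil t)
      · intro h
        exfalso
        rw [list_le_iff] at h
        exact h (List.nil_lt_cons _ _)
  | cons r0 rs ih =>
    match a with
    | [] =>
      simp only [List.cons_append]
      constructor
      · intro _; rw [list_le_iff]; intro h; exact absurd h (List.not_lt_nil _)
      · intro _; exact List.nil_lt_cons _ _
    | x :: t =>
      simp only [List.cons_append, List.cons_lt_cons_iff, cons_le_cons_iff']
      rw [ih t (fun y hy => ha y (by simp [hy]))]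

lemma succ_le_iff (a r : List Int) (ha : ∀ x ∈ a, 0 ≤ x) : r ++ [0] ≤ a ↔ r < a := by
  rw [list_le_iff, lt_succ_iff a r ha, ← Std.not_lt]
  tauto

lemma le_head (r0 a0 : Int) (rs as : List Int) (h : (r0::rs : List Int) ≤ a0::as) : r0 ≤ a0 := by
  rw [list_le_iff] at h
  by_contra hc
  exact h (by simp [List.cons_lt_cons_iff]; omega)

lemma le_tail (r0 : Int) (rs as : List Int) (h : (r0::rs : List Int) ≤ r0::as) : rs ≤ as := by
  rw [list_le_iff] at h ⊢
  intro hc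
  exact h (by simp; tauto)

lemma lt_hi1 (a0 a1 a2 : Int) (rest : List Int) (h1 : 0 ≤ a1) (h2 : 0 ≤ a2) (r0 : Int) :
    (a0::a1::a2::rest : List Int) < [r0+1,0,0] ↔ a0 ≤ r0 := by
  simp only [List.cons_lt_cons_iff]
  constructor
  · rintro (h | ⟨rfl, (h | ⟨rfl, (h | ⟨rfl, h⟩)⟩)⟩)
    · omega
    · omega
    · omega
    · exact absurd h (List.not_lt_nil rest)
  · intro h; left; omega

lemma lt_hi2 (a0 a1 a2 : Int) (rest : List Int) (h2 : 0 ≤ a2) (r0 r1 : Int) :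
    (a0::a1::a2::rest : List Int) < [r0,r1+1,0] ↔ (a0 < r0 ∨ (a0 = r0 ∧ a1 ≤ r1)) := by
  simp only [List.cons_lt_cons_iff]
  constructor
  · rintro (h | ⟨rfl, (h | ⟨rfl, (h | ⟨rfl, h⟩)⟩)⟩)
    · tauto
    · right; exact ⟨rfl, by omega⟩
    · omega
    · exact absurd h (List.not_lt_nil rest)
  · rintro (h | ⟨rfl, h⟩)
    · tauto
    · right; exact ⟨rfl, by left; omega⟩

-- the caret branch: same major ∧ avail ≥ req  ⟺  req ≤ avail < (req0+1, 0, 0)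
lemma caret_eq (a r : List Int) (ha : 3 ≤ a.length) (hnn : ∀ x ∈ a, 0 ≤ x) (hr : 3 ≤ r.length) :
    (decide (PySem.List.pyGetD a 0 0 = PySem.List.pyGetD r 0 0) && decide (r ≤ a)) =
    (decide (r ≤ a) && decide (a < [PySem.List.pyGetD r 0 0 + 1, 0, 0])) := by
  match a, r with
  | a0 :: a1 :: a2 :: arest, r0 :: rrest =>
    have h1 : (0:Int) ≤ a1 := hnn a1 (by simp)
    have h2 : (0:Int) ≤ a2 := hnn a2 (by simp)
    rw [Bool.eq_iff_iff]
    simp only [PySem.List.pyGetD_zero_cons, Bool.and_eq_true,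
      decide_eq_true_eq, lt_hi1 a0 a1 a2 arest h1 h2 r0]
    constructor
    · rintro ⟨heq, hle⟩; exact ⟨hle, le_of_eq heq⟩
    · rintro ⟨hle, hlt⟩
      exact ⟨le_antisymm hlt (le_head _ _ _ _ hle), hle⟩

-- the tilde branch: same major.minor ∧ avail ≥ req  ⟺  req ≤ avail < (req0, req1+1, 0)
lemma tilde_eq (a r : List Int) (ha : 3 ≤ a.length) (hnn : ∀ x ∈ a, 0 ≤ x) (hr : 3 ≤ r.length) :
    (decide (PySem.List.pyGetD a 0 0 = PySem.List.pyGetD r 0 0) &&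
      (decide (PySem.List.pyGetD a 1 0 = PySem.List.pyGetD r 1 0) && decide (r ≤ a))) =
    (decide (r ≤ a) && decide (a < [PySem.List.pyGetD r 0 0, PySem.List.pyGetD r 1 0 + 1, 0])) := by
  match a, r with
  | a0 :: a1 :: a2 :: arest, r0 :: r1 :: rrest =>
    have h2 : (0:Int) ≤ a2 := hnn a2 (by simp)
    have hpos : (0:Int) ≤ (arest.length : Int) + 1 := by positivity
    have hget1a : PySem.List.pyGetD (a0 :: a1 :: a2 :: arest) 1 0 = a1 := by
      simp [PySem.List.pyGetD, PySem.List.pyIdx?, PySem.List.pyGet?, hpos]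
    have hget1r : PySem.List.pyGetD (r0 :: r1 :: rrest) 1 0 = r1 := by
      simp [PySem.List.pyGetD, PySem.List.pyIdx?, PySem.List.pyGet?]
    rw [Bool.eq_iff_iff]
    simp only [PySem.List.pyGetD_zero_cons, hget1a, hget1r, Bool.and_eq_true,
      decide_eq_true_eq, lt_hi2 a0 a1 a2 arest h2 r0 r1]
    constructor
    · rintro ⟨he0, he1, hle⟩; exact ⟨hle, Or.inr ⟨he0, le_of_eq he1⟩⟩
    · rintro ⟨hle, hlt⟩
      have hh : r0 ≤ a0 := le_head _ _ _ _ hle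
      rcases hlt with h' | ⟨he0, h'⟩
      · omega
      · have ht : (r1 :: rrest : List Int) ≤ a1 :: a2 :: arest := le_tail r0 _ _ (he0 ▸ hle)
        have hr1 : r1 ≤ a1 := le_head _ _ _ _ ht
        exact ⟨he0, by omega, hle⟩

-- ===== VERDICT (by name: the statement is the Claim_ definition above) =====
theorem version_satisfies_spec : Claim_equal_version_satisfies := by
  intro available constraint _hdom hpre
  unfold Spec_version_satisfies version_satisfies version_satisfies_alt
  by_cases hsl : constraint = "*" || constraint = "latest"
  · simp [hsl]
  simp only [hsl, Bool.false_eq_true, if_false]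
  rw [vsFindOp_eq_altOp]
  obtain ⟨hver, hops⟩ := altOp_cases constraint.toList
  rcases hpre with h | h | ⟨hA, hC⟩
  · simp [h] at hsl
  · simp [h] at hsl
  obtain ⟨aparts, apre, haeq, halen, hann⟩ := parse_spec available.toList hA
  obtain ⟨rparts, rpre, hreq, hrlen, hrnn⟩ := parse_spec (vsVerOf constraint.toList) hC
  rw [hver] at *
  rw [haeq, hreq, altCore_eq, altCore_eq, haeq, hreq]
  simp only [Option.map_some]
  rcases hops with h | h | h | h | h | h | h | h | h <;> rw [h] <;>
    simp only [altIntervals, List.cons.injEq, Char.reduceEq, and_true, and_false, false_and,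
      List.cons_ne_nil, true_and, reduceCtorEq, if_true, if_false, reduceIte, List.any_cons,
      List.any_nil, Bool.or_false]
  · -- op = "" : exact match = [r, r++[0])
    rw [Bool.eq_iff_iff]
    simp only [Bool.and_eq_true, decide_eq_true_eq, lt_succ_iff aparts rparts hann]
    constructor
    · rintro rfl; exact ⟨le_refl _, le_refl _⟩
    · rintro ⟨h1, h2⟩; exact le_antisymm h2 h1
  · -- op = "^"
    exact caret_eq aparts rparts halen hann hrlen
  · -- op = "~"
    exact tilde_eq aparts rparts halen hann hrlen
  · -- op = ">=" : [r, ∞)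
    simp
  · -- op = "<=" : (-∞, r++[0])
    rw [Bool.eq_iff_iff]
    simp only [Bool.true_and, decide_eq_true_eq, lt_succ_iff aparts rparts hann]
  · -- op = "!=" : (-∞, r) ∪ [r++[0], ∞)
    rw [Bool.eq_iff_iff]
    simp only [Bool.true_and, Bool.and_true, Bool.or_eq_true, decide_eq_true_eq,
      succ_le_iff aparts rparts hann]
    constructor
    · intro hne; exact lt_or_gt_of_ne hne
    · rintro (h' | h')
      · exact ne_of_lt h'
      · exact ne_of_gt h'
  · -- op = "="
    rw [Bool.eq_iff_iff]
    simp only [Bool.and_eq_true, decide_eq_true_eq, lt_succ_iff aparts rparts hann]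
    constructor
    · rintro rfl; exact ⟨le_refl _, le_refl _⟩
    · rintro ⟨h1, h2⟩; exact le_antisymm h2 h1
  · -- op = ">" : [r++[0], ∞)
    rw [Bool.eq_iff_iff]
    simp only [Bool.and_true, decide_eq_true_eq, succ_le_iff aparts rparts hann]
  · -- op = "<"
    simp
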